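-- pv_equiv track=rewrite | github.com/ChristianLeininger/algoExpert | array/veryHard/minimumAreaRectangle/minimumAreaRectangle.py | sort_coordinates
-- ===== SOURCE A (Python) =====
-- from typing import List
--
-- def sort_coordinates(coordinates: List[List[int]]):
--     """ Sort the coordinates in a dictionary
--       with key x and value all y coordinates
--       also remove keys with only one value
--     Args:
--         param1(list): list of coordinates
--     Return: two dictionaries with key x and value all y coordinates
--     """
--     x_dict = {}
--     y_dict = {}
--
--     for coordinate in coordinates:
--         x, y = coordinate
--
--         if x in x_dict:
--             x_dict[x].append(coordinate)
--         else:
--             x_dict[x] = [coordinate]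
--
--         if y in y_dict:
--             y_dict[y].append(coordinate)
--         else:
--             y_dict[y] = [coordinate]
--
--     x_dict = remove_singletons(x_dict)
--     y_dict = remove_singletons(y_dict)
--     return x_dict, y_dict
--
-- def remove_singletons(d: dict) -> dict:
--     """ Remove all keys with only one value
--     Args:
--         param1(dict): dictionary with key x and value all y coordinates
--     Return: dictionary with key x and value all y co without singletons
--     """
--     for key in list(d.keys()):  # use list to create a copy of keys
--         if len(d[key]) == 1:
--             del d[key]
--     return d
-- ===== SOURCE B (Python) =====
-- from typing import List
--
-- def sort_coordinates(coordinates: List[List[int]]):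
--     """Count occurrences of each x and each y in one pass, then build the
--     two dicts directly, inserting only coordinates whose key occurs more
--     than once (no post-hoc singleton deletion)."""
--     x_count = {}
--     y_count = {}
--     for x, y in coordinates:
--         x_count[x] = x_count.get(x, 0) + 1
--         y_count[y] = y_count.get(y, 0) + 1
--     x_dict = {}
--     y_dict = {}
--     for coordinate in coordinates:
--         x, y = coordinate
--         if x_count[x] > 1:
--             x_dict.setdefault(x, []).append(coordinate)
--         if y_count[y] > 1:
--             y_dict.setdefault(y, []).append(coordinate)
--     return x_dict, y_dict
-- ===== Notes on version B (the rewrite author's own statement) =====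
-- stated objective: alternative
-- what changed: A inserts every coordinate into both dicts and then deletes singleton keys by iterating over a copy of the keys; B first counts occurrences of each x and each y in one pass and then builds the dicts directly, inserting only coordinates whose key occurs more than once, so no deletion pass exists.
import Mathlib
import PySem

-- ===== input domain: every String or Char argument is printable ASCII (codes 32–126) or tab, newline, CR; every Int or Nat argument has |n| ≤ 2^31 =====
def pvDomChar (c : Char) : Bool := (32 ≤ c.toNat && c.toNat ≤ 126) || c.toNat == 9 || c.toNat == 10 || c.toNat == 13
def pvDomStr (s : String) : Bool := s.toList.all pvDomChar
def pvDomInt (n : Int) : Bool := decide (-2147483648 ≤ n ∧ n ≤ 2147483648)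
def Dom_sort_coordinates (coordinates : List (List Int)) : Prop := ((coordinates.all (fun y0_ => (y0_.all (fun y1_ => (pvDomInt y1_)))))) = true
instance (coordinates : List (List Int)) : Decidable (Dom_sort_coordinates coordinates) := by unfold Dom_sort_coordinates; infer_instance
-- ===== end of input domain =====

-- B replaces A's insert-everything-then-delete-singletons strategy by a counting pass followed by
-- building the dicts with only the non-singleton keys (objective: alternative; same asymptotic cost).

-- ===== PORT A =====
-- 'x, y = coordinate' — Pre_ restricts to length-2 coordinates, exactly where Python's unpacking succeeds
def pvXY (c : List Int) : Int × Int :=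
  match c with
  | [x, y] => (x, y)
  | _ => (0, 0)

-- one dict update of A's loop body: 'if k in d: d[k].append(c) else: d[k] = [c]'
def pvStepA (d : PySem.Dict Int (List (List Int))) (k : Int) (c : List Int) :
    PySem.Dict Int (List (List Int)) :=
  if d.contains k then d.modify k [] (· ++ [c]) else d.insert k [c]

-- remove_singletons: 'for key in list(d.keys()): if len(d[key]) == 1: del d[key]'
def pvRemoveSingletons (d : PySem.Dict Int (List (List Int))) : PySem.Dict Int (List (List Int)) :=
  d.keys.foldl (fun d k => if (d.getD k []).length == 1 then d.erase k else d) d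

def sort_coordinates (coordinates : List (List Int)) :
    (List (Int × List (List Int))) × (List (Int × List (List Int))) :=
  let p := coordinates.foldl
    (fun s c => (pvStepA s.1 (pvXY c).1 c, pvStepA s.2 (pvXY c).2 c))
    (PySem.Dict.empty, PySem.Dict.empty)
  ((pvRemoveSingletons p.1).items, (pvRemoveSingletons p.2).items)

-- ===== PORT B =====
-- first loop: x_count[x] = x_count.get(x, 0) + 1 (and same for y) — a pair of counting dicts;
-- second loop: 'if count > 1: dict.setdefault(k, []).append(c)' — setdefault-then-append is Dict.modify k [] (· ++ [c])
def sort_coordinates_alt (coordinates : List (List Int)) :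
    (List (Int × List (List Int))) × (List (Int × List (List Int))) :=
  let counts := coordinates.foldl
    (fun s c => (s.1.insert (pvXY c).1 (s.1.getD (pvXY c).1 0 + 1),
                 s.2.insert (pvXY c).2 (s.2.getD (pvXY c).2 0 + 1)))
    ((PySem.Dict.empty : PySem.Dict Int Int), (PySem.Dict.empty : PySem.Dict Int Int))
  let p := coordinates.foldl
    (fun s c =>
      ((if 1 < counts.1.getD (pvXY c).1 0 then s.1.modify (pvXY c).1 [] (· ++ [c]) else s.1),
       (if 1 < counts.2.getD (pvXY c).2 0 then s.2.modify (pvXY c).2 [] (· ++ [c]) else s.2)))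
    (PySem.Dict.empty, PySem.Dict.empty)
  (p.1.items, p.2.items)

-- ===== PRECONDITION & SPEC =====
-- Pre_ excludes coordinates that are not pairs: on those 'x, y = coordinate' raises ValueError in A.
def Pre_sort_coordinates (coordinates : List (List Int)) : Prop :=
  ∀ c ∈ coordinates, c.length = 2
instance (coordinates : List (List Int)) : Decidable (Pre_sort_coordinates coordinates) := by unfold Pre_sort_coordinates; infer_instance

def pvWitness_sort_coordinates : List (List Int) := [[1, 2], [1, 3], [4, 3], [5, 9]]

def Spec_sort_coordinates (coordinates : List (List Int)) (out : (List (Int × List (List Int))) × (List (Int × List (List Int)))) : Prop := out = sort_coordinates_alt coordinates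
instance (coordinates : List (List Int)) (out : (List (Int × List (List Int))) × (List (Int × List (List Int)))) : Decidable (Spec_sort_coordinates coordinates out) := by unfold Spec_sort_coordinates; infer_instance

-- ===== CLAIM (what is proved, stated in full; the proofs are below) =====
def Claim_equal_sort_coordinates : Prop := ∀ (coordinates : List (List Int)), Dom_sort_coordinates coordinates → Pre_sort_coordinates coordinates → Spec_sort_coordinates coordinates (sort_coordinates coordinates)

-- ===== LEMMAS AND PROOFS =====

-- PySem.Set.ofList commutes with List.filter (generalized over the foldl accumulator)
theorem pvSetFoldlFilter (l : List Int) (p : Int → Bool) (s : List Int) :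
    (l.foldl PySem.Set.add s).filter p = (l.filter p).foldl PySem.Set.add (s.filter p) := by
  induction l generalizing s with
  | nil => rfl
  | cons x t ih =>
    simp only [List.foldl_cons, List.filter_cons]
    by_cases hp : p x
    · simp only [hp, if_pos, List.foldl_cons]
      rw [ih]
      congr 1
      by_cases hm : x ∈ s
      · simp [PySem.Set.add, PySem.Set.contains, hm, hp]
      · simp [PySem.Set.add, PySem.Set.contains, hm, List.filter_append, hp]
    · simp only [hp]
      rw [ih]
      congr 1
      by_cases hm : x ∈ s
      · simp [PySem.Set.add, PySem.Set.contains, hm]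
      · simp [PySem.Set.add, PySem.Set.contains, hm, List.filter_append, hp]

theorem pvSetOfListFilter (l : List Int) (p : Int → Bool) :
    PySem.Set.ofList (l.filter p) = (PySem.Set.ofList l).filter p := by
  have := pvSetFoldlFilter l p []
  simpa [PySem.Set.ofList] using this.symm

-- A's branched update is an unconditional Dict.modify
theorem pvStepA_eq_modify (d : PySem.Dict Int (List (List Int))) (k : Int) (c : List Int) :
    pvStepA d k c = d.modify k [] (· ++ [c]) := by
  by_cases h : d.contains k
  · simp [pvStepA, h]
  · simp only [Bool.not_eq_true] at h
    simp [pvStepA, h, PySem.Dict.modify, PySem.Dict.getD_of_not_contains _ _ h]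

-- erasing keys (iterated over a nodup key list) with singleton values is a filter of the items
theorem pvEraseFold (ks : List Int) (d : PySem.Dict Int (List (List Int)))
    (hks : ks.Nodup) (hd : d.keys.Nodup) :
    (ks.foldl (fun d k => if (d.getD k []).length == 1 then d.erase k else d) d).items
      = d.items.filter (fun p => !(ks.contains p.1) || !(p.2.length == 1)) := by
  induction ks generalizing d with
  | nil => simp
  | cons k ks ih =>
    have hkks : k ∉ ks := (List.nodup_cons.mp hks).1
    have hksn : ks.Nodup := (List.nodup_cons.mp hks).2
    simp only [List.foldl_cons]
    by_cases h : (d.getD k []).length = 1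
    · have hif : (if (d.getD k []).length == 1 then d.erase k else d) = d.erase k := by
        simp [h]
      rw [hif]
      have hdk : (d.erase k).keys.Nodup := by
        have : (d.erase k).items.Sublist d.items := by
          simp [PySem.Dict.erase]
        exact (List.Sublist.map Prod.fst this).nodup hd
      rw [ih (d.erase k) hksn hdk]
      have : (d.erase k).items = d.items.filter (fun p => !(p.1 == k)) := rfl
      rw [this, List.filter_filter]
      apply List.filter_congr
      intro p hp
      by_cases hpk : p.1 = k
      · have hv : d.getD p.1 [] = p.2 :=
          PySem.Dict.getD_of_mem_items d (by simpa using hp) hd []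
        rw [hpk] at hv
        subst hpk
        simp [hv ▸ h]
      · simp [hpk]
    · have hif : (if (d.getD k []).length == 1 then d.erase k else d) = d := by
        simp [h]
      rw [hif, ih d hksn hd]
      apply List.filter_congr
      intro p hp
      by_cases hpk : p.1 = k
      · have hv : d.getD p.1 [] = p.2 :=
          PySem.Dict.getD_of_mem_items d (by simpa using hp) hd []
        rw [hpk] at hv
        subst hpk
        have hlen : ¬ p.2.length = 1 := by rw [← hv]; exact h
        simp [hlen, hkks]
      · simp [hpk]

-- remove_singletons keeps exactly the items whose value is not a singleton
theorem pvRemoveSingletons_items (d : PySem.Dict Int (List (List Int))) (hd : d.keys.Nodup) :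
    (pvRemoveSingletons d).items = d.items.filter (fun p => !(p.2.length == 1)) := by
  unfold pvRemoveSingletons
  rw [pvEraseFold d.keys d hd hd]
  apply List.filter_congr
  intro p hp
  have : p.1 ∈ d.keys := List.mem_map_of_mem hp
  simp [this]

-- the grouping fold, characterized: keys in first-occurrence order, values = input-order filters
theorem pvGroupItems (key : List Int → Int) (cs : List (List Int)) :
    (cs.foldl (fun d c => d.modify (key c) [] (· ++ [c])) PySem.Dict.empty).items
      = (PySem.Set.ofList (cs.map key)).map
          (fun k => (k, cs.filter (fun c => key c == k))) := by
  have hmap : cs.foldl (fun d c => d.modify (key c) [] (· ++ [c]))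
        (PySem.Dict.empty : PySem.Dict Int (List (List Int)))
      = (cs.map (fun c => (key c, c))).foldl
          (fun d p => d.modify p.1 [] (· ++ [p.2])) PySem.Dict.empty := by
    rw [List.foldl_map]
  have hnd : (cs.foldl (fun d c => d.modify (key c) [] (· ++ [c]))
      (PySem.Dict.empty : PySem.Dict Int (List (List Int)))).keys.Nodup :=
    PySem.Dict.nodup_keys_foldl_modify_key cs key [] (fun _ c _v => _v ++ [c]) _
      PySem.Dict.nodup_keys_empty
  have hkeys : (cs.foldl (fun d c => d.modify (key c) [] (· ++ [c]))
      (PySem.Dict.empty : PySem.Dict Int (List (List Int)))).keys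
      = PySem.Set.ofList (cs.map key) :=
    PySem.Dict.keys_foldl_modify_key cs key [] (fun _ c _v => _v ++ [c]) _
  have hget : ∀ k, (cs.foldl (fun d c => d.modify (key c) [] (· ++ [c]))
      (PySem.Dict.empty : PySem.Dict Int (List (List Int)))).getD k []
      = cs.filter (fun c => key c == k) := by
    intro k
    rw [hmap, PySem.Dict.getD_foldl_modify_append]
    simp [List.filter_map, Function.comp_def]
  rw [PySem.Dict.items_eq_map_keys _ hnd [], hkeys]
  apply List.map_congr_left
  intro k _
  rw [hget k]

-- the key lemma: A's group-then-delete equals B's count-then-filtered-group, per key function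
theorem pvMain (key : List Int → Int) (cs : List (List Int)) :
    (pvRemoveSingletons (cs.foldl (fun d c => pvStepA d (key c) c) PySem.Dict.empty)).items
      = (cs.foldl (fun d c =>
            if (1 : Int) < ((cs.map key).count (key c) : Int)
            then d.modify (key c) [] (· ++ [c]) else d) PySem.Dict.empty).items := by
  have hA : cs.foldl (fun d c => pvStepA d (key c) c)
        (PySem.Dict.empty : PySem.Dict Int (List (List Int)))
      = cs.foldl (fun d c => d.modify (key c) [] (· ++ [c])) PySem.Dict.empty :=
    PySem.List.foldl_congr_mem cs _ _ _ (fun acc x _ => pvStepA_eq_modify acc (key x) x)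
  have hnd : (cs.foldl (fun d c => d.modify (key c) [] (· ++ [c]))
      (PySem.Dict.empty : PySem.Dict Int (List (List Int)))).keys.Nodup :=
    PySem.Dict.nodup_keys_foldl_modify_key cs key [] (fun _ c _v => _v ++ [c]) _
      PySem.Dict.nodup_keys_empty
  rw [hA, pvRemoveSingletons_items _ hnd, pvGroupItems key cs]
  -- RHS: pull the (input-independent) condition out of the fold as a filter
  simp only [PySem.List.foldl_ite_eq_foldl_filter
        (p := fun c => (1 : Int) < ((cs.map key).count (key c) : Int))
        (f := fun (d : PySem.Dict Int (List (List Int))) c => d.modify (key c) [] (· ++ [c]))]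
  set q : Int → Bool := fun v => decide ((1 : Int) < ((cs.map key).count v : Int)) with hq
  have hfq : (cs.filter (fun c => decide ((1 : Int) < ((cs.map key).count (key c) : Int))))
      = cs.filter (fun c => q (key c)) := rfl
  rw [hfq, pvGroupItems key (cs.filter (fun c => q (key c)))]
  have hmapkey : (cs.filter (fun c => q (key c))).map key = (cs.map key).filter q :=
    (List.filter_map (f := key) (p := q) (l := cs)).symm
  rw [hmapkey, pvSetOfListFilter]
  -- counts vs filtered-length
  have hcount : ∀ k, (cs.filter (fun c => key c == k)).length = (cs.map key).count k := by
    intro k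
    rw [List.count_eq_countP, List.countP_map, ← List.countP_eq_length_filter]
    rfl
  rw [List.filter_map]
  have hfil : (PySem.Set.ofList (cs.map key)).filter
        ((fun p => !(p.2.length == 1)) ∘ fun k => (k, cs.filter (fun c => key c == k)))
      = (PySem.Set.ofList (cs.map key)).filter q := by
    apply List.filter_congr
    intro k hk
    have hkmem : k ∈ cs.map key := (PySem.Set.mem_ofList _ _).mp hk
    have hpos : 0 < (cs.map key).count k := List.count_pos_iff.mpr hkmem
    simp only [Function.comp_apply, hq, hcount k]
    rw [Bool.eq_iff_iff]
    simp only [Bool.not_eq_true', beq_eq_false_iff_ne, ne_eq, decide_eq_true_eq]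
    omega
  rw [hfil]
  apply List.map_congr_left
  intro k hk
  have hqk : q k = true := (List.mem_filter.mp hk).2
  simp only [Prod.mk.injEq, true_and]
  rw [List.filter_filter]
  apply List.filter_congr
  intro c _
  by_cases hck : key c = k
  · simp [hck, hqk]
  · simp [hck]

-- per-key count dict lookup
theorem pvCountGetD (key : List Int → Int) (cs : List (List Int)) (v : Int) :
    (cs.foldl (fun d c => d.insert (key c) (d.getD (key c) 0 + 1))
        (PySem.Dict.empty : PySem.Dict Int Int)).getD v 0
      = ((cs.map key).count v : Int) := by
  rw [← List.foldl_map (f := key)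
        (g := fun (d : PySem.Dict Int Int) x => d.insert x (d.getD x 0 + 1)),
      PySem.Dict.getD_foldl_insert_add_one]
  simp

-- ===== VERDICT (by name: the statement is the Claim_ definition above) =====
theorem sort_coordinates_spec : Claim_equal_sort_coordinates := by
  intro cs _ _
  unfold Spec_sort_coordinates sort_coordinates sort_coordinates_alt
  rw [PySem.List.foldl_prod_mk (f := fun d c => pvStepA d (pvXY c).1 c)
        (g := fun d c => pvStepA d (pvXY c).2 c)]
  rw [PySem.List.foldl_prod_mk (f := fun d c => PySem.Dict.insert d (pvXY c).1 (d.getD (pvXY c).1 0 + 1))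
        (g := fun d c => PySem.Dict.insert d (pvXY c).2 (d.getD (pvXY c).2 0 + 1))]
  simp only
  rw [PySem.List.foldl_prod_mk
        (f := fun d c => if 1 < (cs.foldl (fun d c => PySem.Dict.insert d (pvXY c).1 (d.getD (pvXY c).1 0 + 1)) PySem.Dict.empty).getD (pvXY c).1 0 then PySem.Dict.modify d (pvXY c).1 [] (· ++ [c]) else d)
        (g := fun d c => if 1 < (cs.foldl (fun d c => PySem.Dict.insert d (pvXY c).2 (d.getD (pvXY c).2 0 + 1)) PySem.Dict.empty).getD (pvXY c).2 0 then PySem.Dict.modify d (pvXY c).2 [] (· ++ [c]) else d)]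
  have h1 := pvMain (fun c => (pvXY c).1) cs
  have h2 := pvMain (fun c => (pvXY c).2) cs
  have hc1 : ∀ (d : PySem.Dict Int (List (List Int))), ∀ c ∈ cs,
      (if 1 < (cs.foldl (fun d c => PySem.Dict.insert d (pvXY c).1 (d.getD (pvXY c).1 0 + 1)) (PySem.Dict.empty : PySem.Dict Int Int)).getD (pvXY c).1 0 then PySem.Dict.modify d (pvXY c).1 [] (· ++ [c]) else d)
      = (if (1 : Int) < ((cs.map (fun c => (pvXY c).1)).count (pvXY c).1 : Int) then PySem.Dict.modify d (pvXY c).1 [] (· ++ [c]) else d) := by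
    intro d c _
    simp only [pvCountGetD (fun c => (pvXY c).1) cs (pvXY c).1]
  have hc2 : ∀ (d : PySem.Dict Int (List (List Int))), ∀ c ∈ cs,
      (if 1 < (cs.foldl (fun d c => PySem.Dict.insert d (pvXY c).2 (d.getD (pvXY c).2 0 + 1)) (PySem.Dict.empty : PySem.Dict Int Int)).getD (pvXY c).2 0 then PySem.Dict.modify d (pvXY c).2 [] (· ++ [c]) else d)
      = (if (1 : Int) < ((cs.map (fun c => (pvXY c).2)).count (pvXY c).2 : Int) then PySem.Dict.modify d (pvXY c).2 [] (· ++ [c]) else d) := by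
    intro d c _
    simp only [pvCountGetD (fun c => (pvXY c).2) cs (pvXY c).2]
  rw [PySem.List.foldl_congr_mem _ _ _ _ hc1, PySem.List.foldl_congr_mem _ _ _ _ hc2]
  exact Prod.ext h1.symm h2.symm |>.symm
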